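-- pv_equiv track=rewrite | github.com/luyi0629/python-tdd-exercises | exercises.py | validate_dna
-- ===== SOURCE A (Python) =====
-- def validate_dna(s):
--     """
--     Return True if the DNA string only contains characters
--     a, c, t, or g (lower or uppercase). False otherwise.
--     """
--     # define the dna seq first
--     dna = 'atcgATCG'
--     # idea: for each character in the string - test whether the character is dna - append the initialised list with T/F - after reading all characters, if sum(list) equals the length of string, then T, else F.
--     l = []
--     for c in s:
--         if c in dna:
--           l.append(True)
--         else:
--           l.append(False)
--     if sum(l) == len(s):
--         out=True
--     else:
--         out=False
--     return out
-- ===== SOURCE B (Python) =====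
-- def validate_dna(s):
--     """
--     Return True if the DNA string only contains characters
--     a, c, t, or g (lower or uppercase). False otherwise.
--     """
--     return set(s) <= set('atcgATCG')
-- ===== Notes on version B (the rewrite author's own statement) =====
-- stated objective: idiomatic
-- what changed: Replaces the per-character boolean accumulator list plus sum-vs-length comparison with a single subset test between the set of input characters and the set of valid DNA letters.
import Mathlib
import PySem

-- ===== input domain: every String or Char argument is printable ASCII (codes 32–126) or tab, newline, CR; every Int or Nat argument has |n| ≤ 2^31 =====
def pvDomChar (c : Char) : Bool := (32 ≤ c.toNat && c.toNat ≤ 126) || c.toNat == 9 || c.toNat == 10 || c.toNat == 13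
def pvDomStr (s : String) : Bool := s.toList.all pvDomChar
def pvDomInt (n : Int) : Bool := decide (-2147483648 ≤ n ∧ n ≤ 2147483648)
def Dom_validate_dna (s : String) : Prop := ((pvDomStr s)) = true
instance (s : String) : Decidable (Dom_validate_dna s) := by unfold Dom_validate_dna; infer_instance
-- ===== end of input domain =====

-- B is the idiomatic set-subset test set(s) <= set('atcgATCG'); same return value for every string.

-- ===== PORT A =====
def validate_dna (s : String) : Bool :=
  let dna : String := "atcgATCG"
  let l : List Bool := s.toList.foldl
    (fun l c => if PySem.Chars.isIn [c] dna.toList then l ++ [true] else l ++ [false]) []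
  if (l.map (fun b => if b then (1 : Int) else 0)).sum = (PySem.Str.len s : Int) then true else false

-- ===== PORT B =====
def validate_dna_alt (s : String) : Bool :=
  PySem.Set.issubset (PySem.Set.ofList s.toList) (PySem.Set.ofList "atcgATCG".toList)

-- ===== PRECONDITION & SPEC =====
def Spec_validate_dna (s : String) (out : Bool) : Prop := out = validate_dna_alt s
instance (s : String) (out : Bool) : Decidable (Spec_validate_dna s out) := by unfold Spec_validate_dna; infer_instance

-- ===== CLAIM (what is proved, stated in full; the proofs are below) =====
def Claim_equal_validate_dna : Prop := ∀ (s : String), Dom_validate_dna s → Spec_validate_dna s (validate_dna s)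

-- ===== LEMMAS AND PROOFS =====

-- A's loop body 'if c in dna: l.append(True) else: l.append(False)' appends (c in dna) either way.
theorem pv_foldl_bools (xs : List Char) (dna : List Char) (acc : List Bool) :
    xs.foldl (fun l c => if PySem.Chars.isIn [c] dna then l ++ [true] else l ++ [false]) acc
      = acc ++ xs.map (fun c => PySem.Chars.isIn [c] dna) := by
  induction xs generalizing acc with
  | nil => simp
  | cons c xs ih =>
    simp only [List.foldl_cons, List.map_cons, ih]
    by_cases h : PySem.Chars.isIn [c] dna = true <;> simp [h]

-- singleton 'c in dna' is character membership
theorem pv_isIn_singleton (c : Char) (dna : List Char) :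
    PySem.Chars.isIn [c] dna = true ↔ c ∈ dna := by
  rw [PySem.Chars.isIn_iff_infix]
  constructor
  · rintro ⟨p, q, h⟩
    have : c ∈ p ++ [c] ++ q := by simp
    rw [h] at this; exact this
  · intro h
    obtain ⟨p, q, h⟩ := List.append_of_mem h
    exact ⟨p, q, by simp [h]⟩

-- sum of A's 0/1 list counts the characters in dna, and equals the length iff all are in dna
theorem pv_A_iff (s : String) :
    validate_dna s = true ↔ ∀ c ∈ s.toList, c ∈ ("atcgATCG" : String).toList := by
  unfold validate_dna
  simp only [pv_foldl_bools, List.nil_append, List.map_map, Function.comp_def]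
  rw [PySem.List.sum_map_ite_one_zero]
  have hlen : PySem.Str.len s = (s.toList.length : Int) := by
    simp [PySem.Str.len_eq]
  rw [hlen]
  constructor
  · intro h c hc
    split_ifs at h with heq
    · have hcl : s.toList.countP (fun c => PySem.Chars.isIn [c] ("atcgATCG" : String).toList)
          = s.toList.length := by exact_mod_cast heq
      have hall := (List.countP_eq_length).1 hcl
      have := hall c hc
      exact (pv_isIn_singleton c _).1 (by simpa using this)
  · intro h
    have hcl : s.toList.countP (fun c => PySem.Chars.isIn [c] ("atcgATCG" : String).toList)
        = s.toList.length := by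
      apply List.countP_eq_length.2
      intro c hc
      simpa using (pv_isIn_singleton c _).2 (h c hc)
    simpa using hcl

theorem pv_B_iff (s : String) :
    validate_dna_alt s = true ↔ ∀ c ∈ s.toList, c ∈ ("atcgATCG" : String).toList := by
  unfold validate_dna_alt
  rw [PySem.Set.issubset_iff]
  constructor
  · intro h c hc
    have := h c ((PySem.Set.mem_ofList _ _).2 hc)
    exact (PySem.Set.mem_ofList _ _).1 this
  · intro h c hc
    exact (PySem.Set.mem_ofList _ _).2 (h c ((PySem.Set.mem_ofList _ _).1 hc))

-- ===== VERDICT (by name: the statement is the Claim_ definition above) =====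
theorem validate_dna_spec : Claim_equal_validate_dna := by
  intro s _
  unfold Spec_validate_dna
  by_cases h : validate_dna_alt s = true
  · rw [h, pv_A_iff]; exact (pv_B_iff s).1 h
  · have hb : validate_dna_alt s = false := by simpa using h
    rw [hb]
    by_contra hA
    have : validate_dna s = true := by simpa using hA
    exact h ((pv_B_iff s).2 ((pv_A_iff s).1 this))
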